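-- pv_equiv track=rewrite | github.com/Vytis-K/tase2_phase_switching | src/tase2_phase_switching/analysis.py | guess_dim_name
-- ===== SOURCE A (Python) =====
-- def guess_dim_name(dims: list[str], canonical: str, used: set[str]) -> str | None:
--     alias_groups = {
--         "x": (("x",), ("x_", "_x", "xpos", "x_pos")),
--         "y": (("y",), ("y_", "_y", "ypos", "y_pos")),
--         "eV": (("ev", "energy", "bindingenergy", "binding_energy", "ene"), ("binding", "energy", "ev")),
--         "phi": (("phi", "angle", "angles", "theta", "momentum", "kx", "ky", "k"), ("phi", "angle", "theta", "momentum", "kx", "ky")),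
--     }
--     exact_aliases, partial_aliases = alias_groups[canonical]
--
--     ranked: list[tuple[int, str]] = []
--     for dim in dims:
--         if dim in used:
--             continue
--         lowered = dim.lower()
--         if lowered in exact_aliases:
--             ranked.append((0, dim))
--             continue
--         if any(alias in lowered for alias in partial_aliases):
--             ranked.append((1, dim))
--
--     ranked.sort()
--     return ranked[0][1] if ranked else None
-- ===== SOURCE B (Python) =====
-- def guess_dim_name(dims: list[str], canonical: str, used: set[str]) -> str | None:
--     alias_groups = {
--         "x": (("x",), ("x_", "_x", "xpos", "x_pos")),
--         "y": (("y",), ("y_", "_y", "ypos", "y_pos")),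
--         "eV": (("ev", "energy", "bindingenergy", "binding_energy", "ene"), ("binding", "energy", "ev")),
--         "phi": (("phi", "angle", "angles", "theta", "momentum", "kx", "ky", "k"), ("phi", "angle", "theta", "momentum", "kx", "ky")),
--     }
--     exact_aliases, partial_aliases = alias_groups[canonical]
--
--     exact = [dim for dim in dims if dim not in used and dim.lower() in exact_aliases]
--     if exact:
--         return min(exact)
--     partial = [dim for dim in dims if dim not in used
--                and any(alias in dim.lower() for alias in partial_aliases)]
--     return min(partial) if partial else None
-- ===== Notes on version B (the rewrite author's own statement) =====
-- stated objective: simpler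
-- what changed: B drops A's combined rank-tagged list and its sort: it collects unused exact-alias matches and returns min() of them, and only if that set is empty collects partial matches and returns min() of those (or None), giving the same lexicographically-smallest choice without sorting.
import Mathlib
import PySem

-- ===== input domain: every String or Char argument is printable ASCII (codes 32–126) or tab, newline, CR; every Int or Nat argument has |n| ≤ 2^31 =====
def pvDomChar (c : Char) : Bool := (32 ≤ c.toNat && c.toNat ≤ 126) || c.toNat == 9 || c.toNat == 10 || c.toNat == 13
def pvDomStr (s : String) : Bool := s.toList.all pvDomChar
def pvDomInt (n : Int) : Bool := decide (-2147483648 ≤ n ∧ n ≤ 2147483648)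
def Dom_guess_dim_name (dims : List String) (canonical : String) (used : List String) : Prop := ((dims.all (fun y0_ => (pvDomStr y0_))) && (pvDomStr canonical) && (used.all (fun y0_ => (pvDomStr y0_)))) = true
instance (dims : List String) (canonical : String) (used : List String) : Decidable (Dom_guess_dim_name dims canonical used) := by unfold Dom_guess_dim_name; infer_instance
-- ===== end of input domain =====

-- B replaces A's combined rank-tagged list and its sort by two candidate collections resolved with min(): simpler, same result.

-- ===== PORT A =====
-- the alias_groups dict literal (shared data between the two ports)
def pvAliasGroups : PySem.Dict String (List String × List String) :=
  ((((PySem.Dict.empty).insert "x" (["x"], ["x_", "_x", "xpos", "x_pos"])).insert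
      "y" (["y"], ["y_", "_y", "ypos", "y_pos"])).insert
      "eV" (["ev", "energy", "bindingenergy", "binding_energy", "ene"], ["binding", "energy", "ev"])).insert
      "phi" (["phi", "angle", "angles", "theta", "momentum", "kx", "ky", "k"], ["phi", "angle", "theta", "momentum", "kx", "ky"])

-- A's body after the alias lookup: build the ranked (rank, dim) list, sort it, take head
def pvCoreA (exactA partialA : List String) (dims : List String) (used : List String) : Option String :=
  match PySem.List.sorted2
      (dims.foldl (fun acc dim =>
        if dim ∈ used then acc
        else
          if PySem.Str.lower dim ∈ exactA then acc ++ [((0 : Int), dim)]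
          else if partialA.any (fun al => PySem.Str.isIn al (PySem.Str.lower dim)) then acc ++ [((1 : Int), dim)]
          else acc) [])
      (fun t => t.1) (fun t => t.2) with
  | (_, d) :: _ => some d
  | [] => none

def guess_dim_name (dims : List String) (canonical : String) (used : List String) : Option String :=
  match pvAliasGroups.get? canonical with
  | some (exactA, partialA) => pvCoreA exactA partialA dims used
  | none => none  -- Python raises KeyError here; excluded by Pre_

-- ===== PORT B =====
-- B's body after the alias lookup: exact candidates first, then partial ones, each resolved by min()
def pvCoreB (exactA partialA : List String) (dims : List String) (used : List String) : Option String :=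
  let exact := dims.filter (fun dim => decide (dim ∉ used) && decide (PySem.Str.lower dim ∈ exactA))
  if exact.isEmpty then
    PySem.List.min?
      (dims.filter (fun dim => decide (dim ∉ used) && partialA.any (fun al => PySem.Str.isIn al (PySem.Str.lower dim))))
      (fun x => x)
  else PySem.List.min? exact (fun x => x)

def guess_dim_name_alt (dims : List String) (canonical : String) (used : List String) : Option String :=
  match pvAliasGroups.get? canonical with
  | some (exactA, partialA) => pvCoreB exactA partialA dims used
  | none => none  -- KeyError in Python; outside Pre_

-- ===== PRECONDITION & SPEC =====
-- A (and B) raise KeyError unless canonical is one of the four dict keys; exactly those inputs are excluded.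
def Pre_guess_dim_name (dims : List String) (canonical : String) (used : List String) : Prop :=
  canonical ∈ (["x", "y", "eV", "phi"] : List String)
instance (dims : List String) (canonical : String) (used : List String) : Decidable (Pre_guess_dim_name dims canonical used) := by unfold Pre_guess_dim_name; infer_instance
def pvWitness_guess_dim_name : List String × String × List String := (["X", "kx"], "x", ["kx"])
def Spec_guess_dim_name (dims : List String) (canonical : String) (used : List String) (out : Option String) : Prop := out = guess_dim_name_alt dims canonical used
instance (dims : List String) (canonical : String) (used : List String) (out : Option String) : Decidable (Spec_guess_dim_name dims canonical used out) := by unfold Spec_guess_dim_name; infer_instance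

-- ===== CLAIM (what is proved, stated in full; the proofs are below) =====
def Claim_equal_guess_dim_name : Prop := ∀ (dims : List String) (canonical : String) (used : List String), Dom_guess_dim_name dims canonical used → Pre_guess_dim_name dims canonical used → Spec_guess_dim_name dims canonical used (guess_dim_name dims canonical used)

-- ===== LEMMAS AND PROOFS =====

-- the head-tracking step of an insertion sort / a running minimum
def pvStep {α : Type} (before : α → α → Bool) (m : Option α) (x : α) : Option α :=
  match m with
  | none => some x
  | some y => if before x y then some x else some y

def pvBefore2 (a b : Int × String) : Bool :=
  decide (a.1 < b.1) || (!decide (b.1 < a.1) && decide (a.2 < b.2))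

def pvMinStep (m : Option String) (x : String) : Option String :=
  match m with
  | none => some x
  | some y => if x < y then some x else some y

def pvEnc (e p : Option String) : Option (Int × String) :=
  match e with
  | some m => some (0, m)
  | none => p.map (fun d => ((1 : Int), d))

def pvG (exactA partialA used : List String) (dim : String) : List (Int × String) :=
  if dim ∈ used then []
  else if PySem.Str.lower dim ∈ exactA then [((0 : Int), dim)]
  else if partialA.any (fun al => PySem.Str.isIn al (PySem.Str.lower dim)) then [((1 : Int), dim)]
  else []

lemma pv_head?_insertBy {α : Type} (before : α → α → Bool) (x : α) (acc : List α) :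
    (PySem.List.insertBy before x acc).head? = pvStep before acc.head? x := by
  cases acc with
  | nil => rfl
  | cons y ys =>
    simp only [PySem.List.insertBy, pvStep]
    by_cases h : before x y = true
    · simp [h]
    · simp [h]

lemma pv_head?_foldl_insertBy {α : Type} (before : α → α → Bool) (xs acc : List α) :
    (xs.foldl (fun a x => PySem.List.insertBy before x a) acc).head? = xs.foldl (pvStep before) acc.head? := by
  induction xs generalizing acc with
  | nil => rfl
  | cons x xs ih => simp only [List.foldl_cons, ih, pv_head?_insertBy]

lemma pv_head?_sorted2 (xs : List (Int × String)) :
    (PySem.List.sorted2 xs (fun t => t.1) (fun t => t.2)).head? = xs.foldl (pvStep pvBefore2) none :=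
  pv_head?_foldl_insertBy pvBefore2 xs []

lemma pv_ranked_eq (exactA partialA used dims : List String) :
    (dims.foldl (fun acc dim =>
        if dim ∈ used then acc
        else
          if PySem.Str.lower dim ∈ exactA then acc ++ [((0 : Int), dim)]
          else if partialA.any (fun al => PySem.Str.isIn al (PySem.Str.lower dim)) then acc ++ [((1 : Int), dim)]
          else acc) [])
    = dims.flatMap (pvG exactA partialA used) := by
  have h : (fun (acc : List (Int × String)) dim =>
        if dim ∈ used then acc
        else
          if PySem.Str.lower dim ∈ exactA then acc ++ [((0 : Int), dim)]
          else if partialA.any (fun al => PySem.Str.isIn al (PySem.Str.lower dim)) then acc ++ [((1 : Int), dim)]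
          else acc)
      = fun acc dim => acc ++ pvG exactA partialA used dim := by
    funext acc dim
    simp only [pvG]
    split_ifs <;> simp
  rw [h, PySem.List.foldl_append_eq_flatMap]
  simp

lemma pv_stepE (e p : Option String) (d : String) :
    pvStep pvBefore2 (pvEnc e p) ((0 : Int), d) = pvEnc (pvMinStep e d) p := by
  cases e with
  | none =>
    cases p with
    | none => rfl
    | some pm => simp [pvStep, pvBefore2, pvEnc, pvMinStep]
  | some em =>
    simp only [pvStep, pvBefore2, pvEnc, pvMinStep]
    by_cases h : d < em <;> simp [h]

lemma pv_stepP (e p : Option String) (d : String) :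
    pvStep pvBefore2 (pvEnc e p) ((1 : Int), d) = pvEnc e (pvMinStep p d) := by
  cases e with
  | none =>
    cases p with
    | none => rfl
    | some pm =>
      simp only [pvStep, pvBefore2, pvEnc, pvMinStep, Option.map_some]
      by_cases h : d < pm <;> simp [h]
  | some em => simp [pvStep, pvBefore2, pvEnc]

lemma pv_inv (exactA partialA used dims : List String) :
    ∀ e p, (dims.flatMap (pvG exactA partialA used)).foldl (pvStep pvBefore2) (pvEnc e p)
      = pvEnc
          ((dims.filter (fun d => decide (d ∉ used) && decide (PySem.Str.lower d ∈ exactA))).foldl pvMinStep e)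
          ((dims.filter (fun d => decide (d ∉ used) && !decide (PySem.Str.lower d ∈ exactA) && partialA.any (fun al => PySem.Str.isIn al (PySem.Str.lower d)))).foldl pvMinStep p) := by
  induction dims with
  | nil => intro e p; rfl
  | cons d rest ih =>
    intro e p
    by_cases h1 : d ∈ used
    · have hg : pvG exactA partialA used d = [] := by simp [pvG, h1]
      have hpe : (decide (d ∉ used) && decide (PySem.Str.lower d ∈ exactA)) = false := by simp [h1]
      have hpp : (decide (d ∉ used) && !decide (PySem.Str.lower d ∈ exactA) && partialA.any (fun al => PySem.Str.isIn al (PySem.Str.lower d))) = false := by simp [h1]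
      rw [List.flatMap_cons, hg, List.nil_append, List.filter_cons, List.filter_cons, hpe, hpp]
      simp only [Bool.false_eq_true, if_false]
      exact ih e p
    · by_cases h2 : PySem.Str.lower d ∈ exactA
      · have hg : pvG exactA partialA used d = [((0 : Int), d)] := by simp [pvG, h1, h2]
        have hpe : (decide (d ∉ used) && decide (PySem.Str.lower d ∈ exactA)) = true := by simp [h1, h2]
        have hpp : (decide (d ∉ used) && !decide (PySem.Str.lower d ∈ exactA) && partialA.any (fun al => PySem.Str.isIn al (PySem.Str.lower d))) = false := by simp [h2]
        rw [List.flatMap_cons, hg, List.foldl_append, List.foldl_cons, List.foldl_nil, pv_stepE,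
            List.filter_cons, List.filter_cons, hpe, hpp]
        simp only [Bool.false_eq_true, if_false, if_true, List.foldl_cons]
        exact ih (pvMinStep e d) p
      · by_cases h3 : (partialA.any (fun al => PySem.Str.isIn al (PySem.Str.lower d))) = true
        · have hg : pvG exactA partialA used d = [((1 : Int), d)] := by
            simp only [pvG, if_neg h1, if_neg h2, h3, if_true]
          have hpe : (decide (d ∉ used) && decide (PySem.Str.lower d ∈ exactA)) = false := by simp [h2]
          have hpp : (decide (d ∉ used) && !decide (PySem.Str.lower d ∈ exactA) && partialA.any (fun al => PySem.Str.isIn al (PySem.Str.lower d))) = true := by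
            rw [h3]; simp [h1, h2]
          rw [List.flatMap_cons, hg, List.foldl_append, List.foldl_cons, List.foldl_nil, pv_stepP,
              List.filter_cons, List.filter_cons, hpe, hpp]
          simp only [Bool.false_eq_true, if_false, if_true, List.foldl_cons]
          exact ih e (pvMinStep p d)
        · have hg : pvG exactA partialA used d = [] := by
            simp only [pvG, if_neg h1, if_neg h2, if_neg h3]
          have hpe : (decide (d ∉ used) && decide (PySem.Str.lower d ∈ exactA)) = false := by simp [h2]
          have hpp : (decide (d ∉ used) && !decide (PySem.Str.lower d ∈ exactA) && partialA.any (fun al => PySem.Str.isIn al (PySem.Str.lower d))) = false := by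
            simp only [Bool.and_eq_false_iff]
            right
            simpa using h3
          rw [List.flatMap_cons, hg, List.nil_append, List.filter_cons, List.filter_cons, hpe, hpp]
          simp only [Bool.false_eq_true, if_false]
          exact ih e p

lemma pv_min?_id_eq_foldl (xs : List String) :
    PySem.List.min? xs (fun x => x) = xs.foldl pvMinStep none := by
  unfold PySem.List.min?
  congr 1
  funext m x
  cases m <;> rfl

lemma pv_core_eq (exactA partialA dims used : List String) :
    pvCoreA exactA partialA dims used = pvCoreB exactA partialA dims used := by
  have hhead : (PySem.List.sorted2 (dims.flatMap (pvG exactA partialA used)) (fun t => t.1) (fun t => t.2)).head?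
      = pvEnc
          (PySem.List.min? (dims.filter (fun d => decide (d ∉ used) && decide (PySem.Str.lower d ∈ exactA))) (fun x => x))
          (PySem.List.min? (dims.filter (fun d => decide (d ∉ used) && !decide (PySem.Str.lower d ∈ exactA) && partialA.any (fun al => PySem.Str.isIn al (PySem.Str.lower d)))) (fun x => x)) := by
    rw [pv_head?_sorted2, show (none : Option (Int × String)) = pvEnc none none from rfl, pv_inv,
        ← pv_min?_id_eq_foldl, ← pv_min?_id_eq_foldl]
  unfold pvCoreA pvCoreB
  rw [pv_ranked_eq]
  by_cases hE : dims.filter (fun d => decide (d ∉ used) && decide (PySem.Str.lower d ∈ exactA)) = []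
  · have hnone : PySem.List.min? (dims.filter (fun d => decide (d ∉ used) && decide (PySem.Str.lower d ∈ exactA))) (fun x => x) = none :=
      (PySem.List.min?_eq_none_iff _ _).2 hE
    have hall := List.filter_eq_nil_iff.1 hE
    have hPP : (dims.filter (fun d => decide (d ∉ used) && !decide (PySem.Str.lower d ∈ exactA) && partialA.any (fun al => PySem.Str.isIn al (PySem.Str.lower d))))
        = (dims.filter (fun d => decide (d ∉ used) && partialA.any (fun al => PySem.Str.isIn al (PySem.Str.lower d)))) := by
      apply List.filter_congr
      intro d hd
      have hda := hall d hd
      by_cases h1 : d ∈ used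
      · simp [h1]
      · have h2 : ¬ PySem.Str.lower d ∈ exactA := by
          intro hc; exact absurd hda (by simp [h1, hc])
        simp [h1, h2]
    rw [hnone, hPP] at hhead
    cases hS : PySem.List.sorted2 (dims.flatMap (pvG exactA partialA used)) (fun t => t.1) (fun t => t.2) with
    | nil =>
      rw [hS] at hhead
      simp only [List.head?_nil] at hhead
      have hp : PySem.List.min? (dims.filter (fun d => decide (d ∉ used) && partialA.any (fun al => PySem.Str.isIn al (PySem.Str.lower d)))) (fun x => x) = none := by
        cases hq : PySem.List.min? (dims.filter (fun d => decide (d ∉ used) && partialA.any (fun al => PySem.Str.isIn al (PySem.Str.lower d)))) (fun x => x) with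
        | none => rfl
        | some m => rw [hq] at hhead; simp [pvEnc] at hhead
      simp only [hE, hp]
      rfl
    | cons hd tl =>
      rw [hS] at hhead
      simp only [List.head?_cons] at hhead
      cases hq : PySem.List.min? (dims.filter (fun d => decide (d ∉ used) && partialA.any (fun al => PySem.Str.isIn al (PySem.Str.lower d)))) (fun x => x) with
      | none => rw [hq] at hhead; simp [pvEnc] at hhead
      | some m =>
        rw [hq] at hhead
        simp only [pvEnc, Option.map_some, Option.some.injEq] at hhead
        subst hhead
        simp only [hE]
        rfl
  · cases hm : PySem.List.min? (dims.filter (fun d => decide (d ∉ used) && decide (PySem.Str.lower d ∈ exactA))) (fun x => x) with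
    | none => exact absurd ((PySem.List.min?_eq_none_iff _ _).1 hm) hE
    | some m =>
      rw [hm] at hhead
      have hne : (dims.filter (fun d => decide (d ∉ used) && decide (PySem.Str.lower d ∈ exactA))).isEmpty = false := by
        simpa using hE
      cases hS : PySem.List.sorted2 (dims.flatMap (pvG exactA partialA used)) (fun t => t.1) (fun t => t.2) with
      | nil => rw [hS] at hhead; simp [pvEnc] at hhead
      | cons hd tl =>
        rw [hS] at hhead
        simp only [List.head?_cons, pvEnc, Option.some.injEq] at hhead
        subst hhead
        simp only [hne, Bool.false_eq_true, if_false]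
        exact hm.symm

-- ===== VERDICT (by name: the statement is the Claim_ definition above) =====
theorem guess_dim_name_spec : Claim_equal_guess_dim_name := by
  intro dims canonical used _ hpre
  unfold Spec_guess_dim_name
  have hc : canonical = "x" ∨ canonical = "y" ∨ canonical = "eV" ∨ canonical = "phi" := by
    simpa [Pre_guess_dim_name] using hpre
  rcases hc with h | h | h | h <;> subst h <;>
    simp only [guess_dim_name, guess_dim_name_alt] <;>
    exact pv_core_eq _ _ _ _
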